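-- pv_equiv track=rewrite | github.com/TracyChacon/solving_problems | 2025_10_07_SW_D04_landing_spot.py | find_landing_spot
-- ===== SOURCE A (Python) =====
-- def find_landing_spot(matrix: list[list[int]]) -> list[int]:
--     DIRECTION_OFFSETS  = [(-1, 0), (1,0), (0, -1), (0, 1)]
--
--     rows_length = len(matrix)
--     cols_length = len(matrix[0])
--     least_total_danger = float('inf')
--     landing_coordinates = []
--
--     for row_idx in range(rows_length):
--         for col_idx in range(cols_length):
--             if matrix[row_idx][col_idx] == 0:
--                 current_neighbor_danger = 0
--                 # Sum all danger values from neigbors of a particular landing spot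
--                 for row_offset, col_offset in DIRECTION_OFFSETS:
--                     neighbor_row_idx = row_idx + row_offset
--                     neighbor_col_idx = col_idx + col_offset
--                     if 0 <= neighbor_row_idx < rows_length and 0 <= neighbor_col_idx < cols_length:
--                         current_neighbor_danger += matrix[neighbor_row_idx][neighbor_col_idx]
--                 # Find least total danger, if lesser danger found, keep coordinates in landing_coordinates variable
--                 if current_neighbor_danger < least_total_danger:
--                     least_total_danger = current_neighbor_danger
--                     landing_coordinates = [row_idx, col_idx]
--     return landing_coordinates
-- ===== SOURCE B (Python) =====
-- def find_landing_spot(matrix: list[list[int]]) -> list[int]: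
--     rows = len(matrix)
--     cols = len(matrix[0])
--
--     # Scatter pass: each nonzero cell deposits its danger value onto its
--     # in-bounds neighbors, accumulated in a dict keyed by position.
--     danger = {}
--     for r in range(rows):
--         for c in range(cols):
--             v = matrix[r][c]
--             if v != 0:
--                 for nr, nc in ((r - 1, c), (r + 1, c), (r, c - 1), (r, c + 1)):
--                     if 0 <= nr < rows and 0 <= nc < cols:
--                         danger[(nr, nc)] = danger.get((nr, nc), 0) + v
--
--     # Selection pass: first zero cell (row-major) with minimal accumulated danger.
--     candidates = [(danger.get((r, c), 0), r, c)
--                   for r in range(rows) for c in range(cols)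
--                   if matrix[r][c] == 0]
--     if not candidates:
--         return []
--     _, r, c = min(candidates, key=lambda t: t[0])
--     return [r, c]
-- ===== Notes on version B (the rewrite author's own statement) =====
-- stated objective: alternative
-- what changed: A gathers: for each zero cell it sums its in-bounds neighbors while keeping a running minimum; B scatters: a first pass has every nonzero cell deposit its value onto its in-bounds neighbors in a dict accumulator, and a second pass selects the first zero cell with minimal accumulated danger via min over a candidate list.
import Mathlib
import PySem

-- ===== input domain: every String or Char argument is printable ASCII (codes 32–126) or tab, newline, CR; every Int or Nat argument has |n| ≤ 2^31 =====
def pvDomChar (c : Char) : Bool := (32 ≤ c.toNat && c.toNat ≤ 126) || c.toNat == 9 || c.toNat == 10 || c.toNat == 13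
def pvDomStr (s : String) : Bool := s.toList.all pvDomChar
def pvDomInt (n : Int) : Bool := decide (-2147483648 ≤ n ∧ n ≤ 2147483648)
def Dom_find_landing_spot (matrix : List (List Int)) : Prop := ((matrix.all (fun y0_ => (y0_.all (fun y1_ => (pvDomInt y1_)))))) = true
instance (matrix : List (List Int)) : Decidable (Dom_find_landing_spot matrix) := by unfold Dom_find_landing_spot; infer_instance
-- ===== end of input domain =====

-- B replaces A's per-zero-cell neighbor gathering with a scatter pass (every
-- nonzero cell deposits its value onto its in-bounds neighbors in a dict
-- accumulator) followed by a min-selection over the zero cells; objective: alternative.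


-- ===== PORT A =====
-- matrix[r][c] (indices in range under Pre_)
def pvCell (matrix : List (List Int)) (r c : Int) : Int :=
  PySem.List.pyGetD (PySem.List.pyGetD matrix r []) c 0

-- A's running minimum starts at float('inf'); modelled as Option Int (none = inf)
def pvLtInf (d : Int) (b : Option Int) : Bool :=
  match b with
  | none => true
  | some x => decide (d < x)

-- A's inner loop over DIRECTION_OFFSETS accumulating current_neighbor_danger
def pvDangerA (matrix : List (List Int)) (rows cols r c : Int) : Int :=
  ([(-1, 0), (1, 0), (0, -1), (0, 1)] : List (Int × Int)).foldl (fun acc off =>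
    if 0 ≤ r + off.1 ∧ r + off.1 < rows ∧ 0 ≤ c + off.2 ∧ c + off.2 < cols then
      acc + pvCell matrix (r + off.1) (c + off.2)
    else acc) 0

-- conditional update of (least_total_danger, landing_coordinates)
def pvUpd (st : Option Int × List Int) (t : Int × Int × Int) : Option Int × List Int :=
  if pvLtInf t.1 st.1 then (some t.1, [t.2.1, t.2.2]) else st

-- one iteration of A's cell loop body
def pvStepA (matrix : List (List Int)) (rows cols : Int)
    (st : Option Int × List Int) (p : Int × Int) : Option Int × List Int :=
  if pvCell matrix p.1 p.2 = 0 then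
    pvUpd st (pvDangerA matrix rows cols p.1 p.2, p.1, p.2)
  else st

def find_landing_spot (matrix : List (List Int)) : List Int :=
  let rows : Int := matrix.length
  let cols : Int := (PySem.List.pyGetD matrix 0 []).length
  ((PySem.List.pyRange 0 rows 1).foldl (fun st r =>
      (PySem.List.pyRange 0 cols 1).foldl (fun st c =>
        pvStepA matrix rows cols st (r, c)) st)
    ((none : Option Int), ([] : List Int))).2

-- ===== PORT B =====
-- Source B's matrix[r][c]
def pvAt (matrix : List (List Int)) (r c : Int) : Int :=
  PySem.List.pyGetD (PySem.List.pyGetD matrix r []) c 0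

-- Source B's neighbor tuple ((r-1,c),(r+1,c),(r,c-1),(r,c+1))
def pvNbrs (r c : Int) : List (Int × Int) :=
  [(r - 1, c), (r + 1, c), (r, c - 1), (r, c + 1)]

-- the in-bounds test 0 <= nr < rows and 0 <= nc < cols
def pvInb (rows cols : Int) (p : Int × Int) : Bool :=
  decide (0 ≤ p.1 ∧ p.1 < rows ∧ 0 ≤ p.2 ∧ p.2 < cols)

-- danger[(nr, nc)] = danger.get((nr, nc), 0) + v  (guarded by the bounds test)
def pvDeposit (rows cols v : Int) (d : PySem.Dict (Int × Int) Int) (p : Int × Int) :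
    PySem.Dict (Int × Int) Int :=
  if pvInb rows cols p then d.insert p (d.getD p 0 + v) else d

-- one cell of the scatter pass: a nonzero cell deposits v onto its neighbors
def pvScatterCell (matrix : List (List Int)) (rows cols : Int)
    (d : PySem.Dict (Int × Int) Int) (p : Int × Int) : PySem.Dict (Int × Int) Int :=
  let v := pvAt matrix p.1 p.2
  if v ≠ 0 then (pvNbrs p.1 p.2).foldl (pvDeposit rows cols v) d else d

def find_landing_spot_alt (matrix : List (List Int)) : List Int :=
  let rows : Int := matrix.length
  let cols : Int := (PySem.List.pyGetD matrix 0 []).length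
  let danger : PySem.Dict (Int × Int) Int :=
    (PySem.List.pyRange 0 rows 1).foldl (fun d r =>
      (PySem.List.pyRange 0 cols 1).foldl (fun d c =>
        pvScatterCell matrix rows cols d (r, c)) d) PySem.Dict.empty
  let candidates : List (Int × Int × Int) :=
    (PySem.List.pyRange 0 rows 1).flatMap (fun r =>
      ((PySem.List.pyRange 0 cols 1).filter (fun c => decide (pvAt matrix r c = 0))).map
        (fun c => (danger.getD (r, c) 0, r, c)))
  match PySem.List.min? candidates (fun t => t.1) with
  | none => []
  | some t => [t.2.1, t.2.2]

-- ===== PRECONDITION & SPEC =====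
-- exactly where Python A returns: a nonempty matrix whose rows all have at least
-- len(matrix[0]) entries (an empty matrix or a shorter row makes A raise IndexError)
def Pre_find_landing_spot (matrix : List (List Int)) : Prop :=
  matrix ≠ [] ∧ ∀ row ∈ matrix, (matrix.headD []).length ≤ row.length
instance (matrix : List (List Int)) : Decidable (Pre_find_landing_spot matrix) := by
  unfold Pre_find_landing_spot; infer_instance

def pvWitness_find_landing_spot : List (List Int) := [[1, 0], [2, 3]]

def Spec_find_landing_spot (matrix : List (List Int)) (out : List Int) : Prop := out = find_landing_spot_alt matrix
instance (matrix : List (List Int)) (out : List Int) : Decidable (Spec_find_landing_spot matrix out) := by unfold Spec_find_landing_spot; infer_instance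

-- ===== CLAIM (what is proved, stated in full; the proofs are below) =====
def Claim_equal_find_landing_spot : Prop := ∀ (matrix : List (List Int)), Dom_find_landing_spot matrix → Pre_find_landing_spot matrix → Spec_find_landing_spot matrix (find_landing_spot matrix)

-- ===== LEMMAS AND PROOFS =====

-- the two ports' cell accessors are the same lookup
lemma pvAt_eq_pvCell (matrix : List (List Int)) (r c : Int) : pvAt matrix r c = pvCell matrix r c := rfl

-- A's four-offset accumulation written as four guarded addends
lemma pv_dangerA_eq (matrix : List (List Int)) (rows cols r c : Int) :
    pvDangerA matrix rows cols r c =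
      (if pvInb rows cols (r - 1, c) then pvAt matrix (r - 1) c else 0) +
      (if pvInb rows cols (r + 1, c) then pvAt matrix (r + 1) c else 0) +
      (if pvInb rows cols (r, c - 1) then pvAt matrix r (c - 1) else 0) +
      (if pvInb rows cols (r, c + 1) then pvAt matrix r (c + 1) else 0) := by
  simp only [pvDangerA, pvInb, pvAt_eq_pvCell, List.foldl_cons, List.foldl_nil, decide_eq_true_eq]
  norm_num
  split_ifs <;> first | (exfalso; omega) | ring

-- pointwise effect of one deposit on a lookup
lemma pv_deposit_getD (rows cols v : Int) (d : PySem.Dict (Int × Int) Int)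
    (p q : Int × Int) :
    (pvDeposit rows cols v d p).getD q 0 =
      d.getD q 0 + (if q = p ∧ pvInb rows cols p then v else 0) := by
  unfold pvDeposit
  by_cases hin : pvInb rows cols p
  · by_cases hq : q = p
    · subst hq; simp [hin, PySem.Dict.getD_insert]
    · simp [hin, hq, PySem.Dict.getD_insert]
  · simp [hin]

-- pointwise effect of the four-neighbor deposit fold
lemma pv_nbrs_getD (rows cols v : Int) (d : PySem.Dict (Int × Int) Int)
    (a b : Int) (q : Int × Int) :
    ((pvNbrs a b).foldl (pvDeposit rows cols v) d).getD q 0 =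
      d.getD q 0 + (if q ∈ pvNbrs a b ∧ pvInb rows cols q then v else 0) := by
  obtain ⟨x, y⟩ := q
  simp only [pvNbrs, List.foldl_cons, List.foldl_nil, pv_deposit_getD,
    List.mem_cons, List.not_mem_nil, or_false, Prod.mk.injEq, pvInb, decide_eq_true_eq]
  split_ifs <;> first | (exfalso; omega) | ring

-- pointwise effect of one scatter step
lemma pv_scatter_cell_getD (matrix : List (List Int)) (rows cols : Int)
    (d : PySem.Dict (Int × Int) Int) (p q : Int × Int) :
    (pvScatterCell matrix rows cols d p).getD q 0 =
      d.getD q 0 +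
        (if q ∈ pvNbrs p.1 p.2 ∧ pvInb rows cols q then pvAt matrix p.1 p.2 else 0) := by
  unfold pvScatterCell
  by_cases hv : pvAt matrix p.1 p.2 ≠ 0
  · rw [if_pos hv, pv_nbrs_getD]
  · rw [if_neg hv]
    push_neg at hv
    simp [hv]

-- pointwise effect of the scatter fold over any cell list
lemma pv_scatter_fold_getD (matrix : List (List Int)) (rows cols : Int)
    (P : List (Int × Int)) (d : PySem.Dict (Int × Int) Int) (q : Int × Int) :
    (P.foldl (pvScatterCell matrix rows cols) d).getD q 0 =
      d.getD q 0 +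
        (P.map (fun p =>
          if q ∈ pvNbrs p.1 p.2 ∧ pvInb rows cols q then pvAt matrix p.1 p.2 else 0)).sum := by
  induction P generalizing d with
  | nil => simp
  | cons p t ih =>
    simp only [List.foldl_cons, List.map_cons, List.sum_cons, ih, pv_scatter_cell_getD]
    ring

-- summing a point indicator over a duplicate-free int list
lemma pv_sum_indicator (g : Int → Int) (L : List Int) (hL : L.Nodup) (a : Int) :
    (L.map (fun x => if x = a then g x else 0)).sum = if a ∈ L then g a else 0 := by
  induction L with
  | nil => simp
  | cons x t ih =>
    obtain ⟨hx, ht⟩ := List.nodup_cons.mp hL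
    by_cases hxa : x = a
    · subst hxa
      have hz : (t.map (fun z => if z = x then g z else 0)) = t.map (fun _ => (0 : Int)) :=
        List.map_congr_left (fun z hzt => if_neg (by rintro rfl; exact hx hzt))
    
      simp [hz]
    · have hax : a ≠ x := fun h => hxa h.symm
      simp [hxa, hax, ih ht]

-- the sum of a flatMap is the sum of the inner sums
lemma pv_sum_flatMap {α : Type} (l : List α) (g : α → List Int) :
    (l.flatMap g).sum = (l.map (fun x => (g x).sum)).sum := by
  induction l with
  | nil => rfl
  | cons x t ih => simp [List.flatMap_cons, ih]

-- summing a point indicator over the whole cell grid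
lemma pv_sum_ind_P (rows cols : Int) (f : Int × Int → Int) (n : Int × Int) :
    (((PySem.List.pyRange 0 rows 1).flatMap (fun r =>
        (PySem.List.pyRange 0 cols 1).map (fun c => (r, c)))).map
      (fun p => if p = n then f p else 0)).sum =
      if pvInb rows cols n then f n else 0 := by
  obtain ⟨n1, n2⟩ := n
  rw [List.map_flatMap, pv_sum_flatMap]
  have hrow : ∀ r : Int,
      ((((PySem.List.pyRange 0 cols 1).map (fun c => (r, c))).map
        (fun p => if p = (n1, n2) then f p else 0)).sum) =
      (if r = n1 then
        (if n2 ∈ PySem.List.pyRange 0 cols 1 then f (n1, n2) else 0) else 0) := by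
    intro r
    rw [List.map_map]
    by_cases hr : r = n1
    · subst hr
      have hcongr : ((fun p : Int × Int => if p = (r, n2) then f p else 0) ∘
          (fun c : Int => (r, c))) = (fun c : Int => if c = n2 then f (r, c) else 0) := by
        funext c
        simp [Prod.ext_iff]
      rw [hcongr, pv_sum_indicator (fun c => f (r, c)) _ (PySem.List.nodup_pyRange_one _ _) n2]
      simp
    · have hz : ((fun p : Int × Int => if p = (n1, n2) then f p else 0) ∘
          (fun c : Int => (r, c))) = (fun _ : Int => (0 : Int)) := by
        funext c
        simp [Prod.ext_iff, hr]
      rw [hz, if_neg hr]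
      simp
  rw [List.map_congr_left (fun r _ => hrow r),
    pv_sum_indicator (fun _ => if n2 ∈ PySem.List.pyRange 0 cols 1 then f (n1, n2) else 0)
      _ (PySem.List.nodup_pyRange_one _ _) n1]
  simp only [PySem.List.mem_pyRange_one, pvInb, decide_eq_true_eq]
  split_ifs <;> first | rfl | (exfalso; omega)

-- the gather sum equals the scatter total at an in-bounds cell
lemma pv_gather_eq_scatter (matrix : List (List Int)) (rows cols : Int)
    (q : Int × Int) (hq : pvInb rows cols q) :
    (((PySem.List.pyRange 0 rows 1).flatMap (fun r =>
        (PySem.List.pyRange 0 cols 1).map (fun c => (r, c)))).map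
      (fun p => if q ∈ pvNbrs p.1 p.2 ∧ pvInb rows cols q then pvAt matrix p.1 p.2 else 0)).sum =
      pvDangerA matrix rows cols q.1 q.2 := by
  obtain ⟨a, b⟩ := q
  simp only [pvInb, decide_eq_true_eq] at hq
  obtain ⟨ha0, har, hb0, hbc⟩ := hq
  have hpt : ∀ p : Int × Int,
      (if (a, b) ∈ pvNbrs p.1 p.2 ∧ pvInb rows cols (a, b) then pvAt matrix p.1 p.2 else 0) =
      (if p = (a - 1, b) then pvAt matrix p.1 p.2 else 0) +
      (if p = (a + 1, b) then pvAt matrix p.1 p.2 else 0) +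
      (if p = (a, b - 1) then pvAt matrix p.1 p.2 else 0) +
      (if p = (a, b + 1) then pvAt matrix p.1 p.2 else 0) := by
    rintro ⟨x, y⟩
    simp only [pvNbrs, List.mem_cons, List.not_mem_nil, or_false, Prod.mk.injEq, pvInb, decide_eq_true_eq] at *
    split_ifs <;> first | (exfalso; omega) | ring
  rw [List.map_congr_left (fun p _ => hpt p)]
  rw [List.sum_map_add, List.sum_map_add, List.sum_map_add]
  rw [pv_sum_ind_P rows cols _ (a - 1, b), pv_sum_ind_P rows cols _ (a + 1, b),
    pv_sum_ind_P rows cols _ (a, b - 1), pv_sum_ind_P rows cols _ (a, b + 1)]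
  rw [pv_dangerA_eq]

-- project B's "best candidate so far" onto A's (least_total_danger, landing_coordinates)
def pvProj : Option (Int × Int × Int) → Option Int × List Int
  | none => (none, [])
  | some t => (some t.1, [t.2.1, t.2.2])

-- min?'s folding step (first strict minimum by the first component)
def pvMinStep (acc : Option (Int × Int × Int)) (x : Int × Int × Int) : Option (Int × Int × Int) :=
  match acc with
  | none => some x
  | some m => if x.1 < m.1 then some x else some m

-- a fold that skips elements failing p is the fold over the filterMap of the kept images
lemma pv_foldl_skip {γ α σ : Type} (p : γ → Prop) [DecidablePred p] (g : γ → α)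
    (step : σ → α → σ) (l : List γ) (s : σ) :
    l.foldl (fun st x => if p x then step st (g x) else st) s =
      (l.filterMap (fun x => if p x then some (g x) else none)).foldl step s := by
  induction l generalizing s with
  | nil => rfl
  | cons x t ih => by_cases h : p x <;> simp [h, ih]

-- A's conditional update applied to a projected state is the projection of min?'s step
lemma pv_upd_proj (m : Option (Int × Int × Int)) (x : Int × Int × Int) :
    pvUpd (pvProj m) x = pvProj (pvMinStep m x) := by
  cases m with
  | none => simp [pvUpd, pvProj, pvMinStep, pvLtInf]
  | some mm =>
    by_cases h : x.1 < mm.1 <;> simp [pvUpd, pvProj, pvMinStep, pvLtInf, h]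

-- A's running-minimum fold is pvProj of min?'s first-minimum fold
lemma pv_foldl_proj (l : List (Int × Int × Int)) (m : Option (Int × Int × Int)) :
    l.foldl pvUpd (pvProj m) = pvProj (l.foldl pvMinStep m) := by
  induction l generalizing m with
  | nil => rfl
  | cons x t ih =>
    simp only [List.foldl_cons, pv_upd_proj]
    exact ih (pvMinStep m x)

-- the per-row filterMap of kept cells is Source B's filter-then-map comprehension
lemma pv_inner (matrix : List (List Int)) (rows cols r : Int) (CL : List Int) :
    CL.filterMap (fun c => if pvCell matrix r c = 0 then
        some (pvDangerA matrix rows cols r c, r, c) else none) =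
      (CL.filter (fun c => decide (pvCell matrix r c = 0))).map
        (fun c => (pvDangerA matrix rows cols r c, r, c)) := by
  induction CL with
  | nil => rfl
  | cons c t ih =>
    by_cases h : pvCell matrix r c = 0 <;> simp [h, ih]

-- the whole equivalence, for every matrix
lemma pv_main (matrix : List (List Int)) :
    find_landing_spot matrix = find_landing_spot_alt matrix := by
  simp only [find_landing_spot, find_landing_spot_alt]
  generalize hrows : (matrix.length : Int) = rows
  generalize hcols : ((PySem.List.pyGetD matrix 0 []).length : Int) = cols
  set RL := PySem.List.pyRange 0 rows 1 with hRL
  set CL := PySem.List.pyRange 0 cols 1 with hCL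
  set P : List (Int × Int) := RL.flatMap (fun r => CL.map (fun c => (r, c))) with hP
  -- flatten A's nested loop into one fold over all cells
  have h1 : RL.foldl (fun st r => CL.foldl (fun st c => pvStepA matrix rows cols st (r, c)) st)
        ((none : Option Int), ([] : List Int)) =
      P.foldl (pvStepA matrix rows cols) ((none : Option Int), ([] : List Int)) := by
    rw [hP, List.foldl_flatMap]
    simp only [List.foldl_map]
  -- drop the skipped (nonzero) cells: fold over the candidate triples only
  have h2 : P.foldl (pvStepA matrix rows cols) ((none : Option Int), ([] : List Int)) =
      (P.filterMap (fun p : Int × Int => if pvCell matrix p.1 p.2 = 0 then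
          some (pvDangerA matrix rows cols p.1 p.2, p.1, p.2) else none)).foldl pvUpd
        ((none : Option Int), ([] : List Int)) :=
    pv_foldl_skip (fun p : Int × Int => pvCell matrix p.1 p.2 = 0)
      (fun p : Int × Int => (pvDangerA matrix rows cols p.1 p.2, p.1, p.2)) pvUpd _ _
  -- flatten B's nested scatter loop too
  have hd : RL.foldl (fun d r => CL.foldl (fun d c => pvScatterCell matrix rows cols d (r, c)) d)
        (PySem.Dict.empty : PySem.Dict (Int × Int) Int) =
      P.foldl (pvScatterCell matrix rows cols) PySem.Dict.empty := by
    rw [hP, List.foldl_flatMap]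
    simp only [List.foldl_map]
  -- A's filterMapped candidate list is exactly B's candidates list
  have h3 : P.filterMap (fun p : Int × Int => if pvCell matrix p.1 p.2 = 0 then
        some (pvDangerA matrix rows cols p.1 p.2, p.1, p.2) else none) =
      RL.flatMap (fun r =>
        (CL.filter (fun c => decide (pvAt matrix r c = 0))).map
          (fun c => ((RL.foldl (fun d r => CL.foldl (fun d c =>
              pvScatterCell matrix rows cols d (r, c)) d)
            (PySem.Dict.empty : PySem.Dict (Int × Int) Int)).getD (r, c) 0, r, c))) := by
    rw [hP, List.filterMap_flatMap]
    refine List.flatMap_congr (fun r hr => ?_)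
    rw [List.filterMap_map]
    simp only [Function.comp_def, pvAt_eq_pvCell]
    rw [pv_inner matrix rows cols r CL]
    refine List.map_congr_left (fun c hc => ?_)
    have hcCL : c ∈ CL := (List.mem_filter.mp hc).1
    have hinb : pvInb rows cols (r, c) := by
      have h1 := (PySem.List.mem_pyRange_one).mp (hRL ▸ hr)
      have h2 := (PySem.List.mem_pyRange_one).mp (hCL ▸ hcCL)
      simp only [pvInb, decide_eq_true_eq]
      exact ⟨h1.1, h1.2, h2.1, h2.2⟩
    rw [hd, pv_scatter_fold_getD, PySem.Dict.getD_empty, zero_add, hP,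
      pv_gather_eq_scatter matrix rows cols (r, c) hinb]
  rw [h1, h2, h3]
  set L := RL.flatMap (fun r =>
    (CL.filter (fun c => decide (pvAt matrix r c = 0))).map
      (fun c => ((RL.foldl (fun d r => CL.foldl (fun d c =>
          pvScatterCell matrix rows cols d (r, c)) d)
        (PySem.Dict.empty : PySem.Dict (Int × Int) Int)).getD (r, c) 0, r, c))) with hL
  have hmin : PySem.List.min? L (fun t : Int × Int × Int => t.1) =
      L.foldl pvMinStep none := by
    unfold PySem.List.min?
    congr 1
    funext acc x
    cases acc <;> rfl
  rw [hmin]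
  rw [show ((none : Option Int), ([] : List Int)) = pvProj none from rfl, pv_foldl_proj]
  cases L.foldl pvMinStep none <;> simp [pvProj]

-- ===== VERDICT (by name: the statement is the Claim_ definition above) =====
theorem find_landing_spot_spec : Claim_equal_find_landing_spot := by
  intro matrix _ _
  unfold Spec_find_landing_spot
  exact pv_main matrix
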